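-- pv_equiv track=rewrite | github.com/grey721/DL-Compiler | ir/conversion/optimization/weight_reorder.py | make_list_array
-- ===== SOURCE A (Python) =====
-- def make_list_array(shape):  # 创建相应shape的矩阵列表
--     lenth = len(shape)
--     assert (lenth == 2 or lenth == 3 or lenth == 1)
--     if lenth == 1:
--         array = []
--         for i in range(shape[0]):
--             array.append([])
--         return array
--     if lenth == 2:
--         array = []
--         for i in range(shape[0]):
--             tem = []
--             for j in range(shape[1]):
--                 tem.append([])
--             array.append(tem)
--         return array
--     if lenth == 3:
--         array = []
--         for i in range(shape[0]):
--             tem1 = []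
--             for j in range(shape[1]):
--                 tem2 = []
--                 for z in range(shape[2]):
--                     tem2.append([])
--                 tem1.append(tem2)
--             array.append(tem1)
--         return array
-- ===== SOURCE B (Python) =====
-- def make_list_array(shape):  # 创建相应shape的矩阵列表
--     assert len(shape) in (1, 2, 3)
--
--     def build(dims):
--         if not dims:
--             return []
--         return [build(dims[1:]) for _ in range(dims[0])]
--
--     return build(shape)
-- ===== Notes on version B (the rewrite author's own statement) =====
-- stated objective: simpler
-- what changed: Replaces the three hand-unrolled length-specific nested loops with a single recursive build helper that peels the first dimension off the shape and recurses on the tail, a comprehension materializing fresh lists at each level.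
import Mathlib
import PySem

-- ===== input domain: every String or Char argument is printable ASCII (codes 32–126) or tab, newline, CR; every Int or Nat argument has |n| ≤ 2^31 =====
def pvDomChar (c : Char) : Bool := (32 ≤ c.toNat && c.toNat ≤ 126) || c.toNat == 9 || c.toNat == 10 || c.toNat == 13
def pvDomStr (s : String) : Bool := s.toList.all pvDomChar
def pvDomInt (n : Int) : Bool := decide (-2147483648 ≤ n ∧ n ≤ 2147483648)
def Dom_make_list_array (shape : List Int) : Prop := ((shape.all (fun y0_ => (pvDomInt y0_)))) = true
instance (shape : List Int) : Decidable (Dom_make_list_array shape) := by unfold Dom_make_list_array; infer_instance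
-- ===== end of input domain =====

-- B replaces A's three hand-unrolled length-specific nested append loops with one
-- recursion over the shape (comprehension per level); objective: simpler.

-- ===== PORT A =====
-- Literal transliteration of A: per length case, range loops appending to accumulators.
def make_list_array (shape : List Int) : List (List (List (List Int))) :=
  let lenth : Int := shape.length
  if lenth == 1 then
    (PySem.List.pyRange 0 (PySem.List.pyGetD shape 0 0) 1).foldl
      (fun array _ => array ++ [[]]) []
  else if lenth == 2 then
    (PySem.List.pyRange 0 (PySem.List.pyGetD shape 0 0) 1).foldl
      (fun array _ =>
        let tem := (PySem.List.pyRange 0 (PySem.List.pyGetD shape 1 0) 1).foldl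
          (fun tem _ => tem ++ [([] : List (List Int))]) []
        array ++ [tem]) []
  else if lenth == 3 then
    (PySem.List.pyRange 0 (PySem.List.pyGetD shape 0 0) 1).foldl
      (fun array _ =>
        let tem1 := (PySem.List.pyRange 0 (PySem.List.pyGetD shape 1 0) 1).foldl
          (fun tem1 _ =>
            let tem2 := (PySem.List.pyRange 0 (PySem.List.pyGetD shape 2 0) 1).foldl
              (fun tem2 _ => tem2 ++ [([] : List Int)]) []
            tem1 ++ [tem2]) []
        array ++ [tem1]) []
  else []  -- unreachable under Pre_ (assert fails in Python)

-- ===== PORT B =====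
-- B's build(dims): [] when dims is empty, else [build(dims[1:]) for _ in range(dims[0])].
-- The recursion is monomorphized per depth (the nesting depth appears in the Lean type),
-- so build is written as one match on the shape with a shared 'comprehension of a constant' helper.
def buildRep {α : Type} (n : Int) (x : α) : List α :=
  (PySem.List.pyRange 0 n 1).map (fun _ => x)

def make_list_array_alt (shape : List Int) : List (List (List (List Int))) :=
  match shape with
  | [a] => buildRep a []
  | [a, b] => buildRep a (buildRep b [])
  | [a, b, c] => buildRep a (buildRep b (buildRep c []))
  | _ => []  -- unreachable under Pre_ (assert fails in Python)

-- ===== PRECONDITION & SPEC =====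
-- Pre_: exactly where A's assert passes (len(shape) in {1,2,3}); elsewhere Python raises AssertionError.
def Pre_make_list_array (shape : List Int) : Prop :=
  shape.length = 1 ∨ shape.length = 2 ∨ shape.length = 3
instance (shape : List Int) : Decidable (Pre_make_list_array shape) := by
  unfold Pre_make_list_array; infer_instance

def pvWitness_make_list_array : List Int := [2, 3]

def Spec_make_list_array (shape : List Int) (out : List (List (List (List Int)))) : Prop := out = make_list_array_alt shape
instance (shape : List Int) (out : List (List (List (List Int)))) : Decidable (Spec_make_list_array shape out) := by unfold Spec_make_list_array; infer_instance

-- ===== CLAIM (what is proved, stated in full; the proofs are below) =====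
def Claim_equal_make_list_array : Prop := ∀ (shape : List Int), Dom_make_list_array shape → Pre_make_list_array shape → Spec_make_list_array shape (make_list_array shape)

-- ===== LEMMAS AND PROOFS =====

-- ===== VERDICT (by name: the statement is the Claim_ definition above) =====
theorem make_list_array_spec : Claim_equal_make_list_array := by
  intro shape _ hpre
  unfold Spec_make_list_array make_list_array make_list_array_alt buildRep
  rcases hpre with h | h | h
  · match shape, h with
    | [a], _ => simp [PySem.List.pyGetD]
  · match shape, h with
    | [a, b], _ => simp [PySem.List.pyGetD]
  · match shape, h with
    | [a, b, c], _ => simp [PySem.List.pyGetD]
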